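-- pv_equiv track=rewrite | github.com/CGCSAMR/GAN_FEMTO_RUL | FEMTO10052018/FEMTO/data_pros.py | index_dir
-- ===== SOURCE A (Python) =====
-- def index_dir(file_list):
--     #Generacion de lsitas de ordenamiento
--     index_table = []  #Numero para la seleccion
--     unit_table =[]    #Numero de rodameinto a probar
--     number_unit = []  #Numero de ciclo de la unidad
--
--     index = 0
--     un_index = 0
--     for i in file_list:
--         nr_index = 0
--         for j in i:
--             index_table.append(index)
--             unit_table.append(un_index)
--             number_unit.append(nr_index)
--             index += 1
--             nr_index += 1
--         un_index += 1
--     return index_table, unit_table, number_unit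
-- ===== SOURCE B (Python) =====
-- def index_dir(file_list):
--     # length-table-first decomposition: precompute inner lengths, build tables in bulk
--     lengths = [len(i) for i in file_list]
--     index_table = list(range(sum(lengths)))
--     unit_table = []
--     number_unit = []
--     for un, n in enumerate(lengths):
--         unit_table.extend([un] * n)
--         number_unit.extend(range(n))
--     return index_table, unit_table, number_unit
-- ===== Notes on version B (the rewrite author's own statement) =====
-- stated objective: simpler
-- what changed: Replaces the nested per-element loop with three running counters by a precomputed length table: the index table is a single range over the total length, and the unit/cycle tables are built per inner list in bulk via extend with a replicated unit and a range.
import Mathlib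
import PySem

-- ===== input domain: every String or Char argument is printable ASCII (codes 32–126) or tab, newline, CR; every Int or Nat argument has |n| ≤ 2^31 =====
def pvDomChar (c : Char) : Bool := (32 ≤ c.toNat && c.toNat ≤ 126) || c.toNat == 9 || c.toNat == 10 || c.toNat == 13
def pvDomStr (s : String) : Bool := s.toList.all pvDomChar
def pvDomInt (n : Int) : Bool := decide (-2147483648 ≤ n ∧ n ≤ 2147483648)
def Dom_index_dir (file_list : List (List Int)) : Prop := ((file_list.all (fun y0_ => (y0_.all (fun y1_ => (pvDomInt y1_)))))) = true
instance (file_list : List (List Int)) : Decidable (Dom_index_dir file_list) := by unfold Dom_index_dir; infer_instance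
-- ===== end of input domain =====

-- B builds the tables from a precomputed length table (one range for the index
-- table, bulk extends per inner list) instead of A's nested loop with running
-- counters; objective: simpler.

-- ===== PORT A =====
def index_dir (file_list : List (List Int)) : List Int × List Int × List Int :=
  let fin := file_list.foldl
    (fun (st : List Int × List Int × List Int × Int × Int) i =>
      let un_index := st.2.2.2.2
      let inner := i.foldl
        (fun (q : (List Int × List Int × List Int × Int) × Int) _j =>
          ((q.1.1 ++ [q.1.2.2.2], q.1.2.1 ++ [un_index], q.1.2.2.1 ++ [q.2], q.1.2.2.2 + 1), q.2 + 1))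
        ((st.1, st.2.1, st.2.2.1, st.2.2.2.1), (0 : Int))
      (inner.1.1, inner.1.2.1, inner.1.2.2.1, inner.1.2.2.2, un_index + 1))
    ([], [], [], 0, 0)
  (fin.1, fin.2.1, fin.2.2.1)

-- ===== PORT B =====
def index_dir_alt (file_list : List (List Int)) : List Int × List Int × List Int :=
  let lengths : List Int := file_list.map (fun i => (i.length : Int))
  let index_table := PySem.List.pyRange 0 lengths.sum 1
  let un :=
    (PySem.List.enumerate lengths 0).foldl
      (fun (st : List Int × List Int) p =>
        (st.1 ++ PySem.List.pyRepeat [p.1] p.2, st.2 ++ PySem.List.pyRange 0 p.2 1))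
      ([], [])
  (index_table, un.1, un.2)

-- ===== PRECONDITION & SPEC =====
def Spec_index_dir (file_list : List (List Int)) (out : List Int × List Int × List Int) : Prop := out = index_dir_alt file_list
instance (file_list : List (List Int)) (out : List Int × List Int × List Int) : Decidable (Spec_index_dir file_list out) := by unfold Spec_index_dir; infer_instance

-- ===== CLAIM (what is proved, stated in full; the proofs are below) =====
def Claim_equal_index_dir : Prop := ∀ (file_list : List (List Int)), Dom_index_dir file_list → Spec_index_dir file_list (index_dir file_list)

-- ===== LEMMAS AND PROOFS =====

/-- total number of elements, as the Int sum of inner lengths -/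
def pvTot (fl : List (List Int)) : Int := (fl.map (fun i => (i.length : Int))).sum

/-- unit table segments: replicate each inner length many copies of its unit index -/
def pvU : List (List Int) → Int → List Int
  | [], _ => []
  | i :: rest, s => List.replicate i.length s ++ pvU rest (s + 1)

/-- cycle table segments: a 0-based range per inner list -/
def pvN : List (List Int) → List Int
  | [] => []
  | i :: rest => PySem.List.pyRange 0 (i.length : Int) 1 ++ pvN rest

lemma innerA (i : List Int) (it ut nu : List Int) (idx nr un : Int) :
    i.foldl
      (fun (q : (List Int × List Int × List Int × Int) × Int) _j =>
        ((q.1.1 ++ [q.1.2.2.2], q.1.2.1 ++ [un], q.1.2.2.1 ++ [q.2], q.1.2.2.2 + 1), q.2 + 1))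
      ((it, ut, nu, idx), nr)
    = ((it ++ PySem.List.pyRange idx (idx + i.length) 1,
        ut ++ List.replicate i.length un,
        nu ++ PySem.List.pyRange nr (nr + i.length) 1,
        idx + i.length), nr + i.length) := by
  induction i generalizing it ut nu idx nr with
  | nil => simp [PySem.List.pyRange_one_eq_nil]
  | cons x xs ih =>
      simp only [List.foldl_cons]
      rw [ih]
      have h1 : PySem.List.pyRange idx (idx + (xs.length + 1 : Nat)) 1
          = idx :: PySem.List.pyRange (idx + 1) (idx + 1 + xs.length) 1 := by
        rw [PySem.List.pyRange_one_cons (by omega)]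
        congr 2
        omega
      have h2 : PySem.List.pyRange nr (nr + (xs.length + 1 : Nat)) 1
          = nr :: PySem.List.pyRange (nr + 1) (nr + 1 + xs.length) 1 := by
        rw [PySem.List.pyRange_one_cons (by omega)]
        congr 2
        omega
      simp only [List.length_cons]
      rw [h1, h2]
      simp [List.replicate_succ, List.append_assoc]
      and_intros <;> omega

lemma outerA (fl : List (List Int)) (it ut nu : List Int) (idx un : Int) :
    fl.foldl
      (fun (st : List Int × List Int × List Int × Int × Int) i =>
        let un_index := st.2.2.2.2
        let inner := i.foldl
          (fun (q : (List Int × List Int × List Int × Int) × Int) _j =>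
            ((q.1.1 ++ [q.1.2.2.2], q.1.2.1 ++ [un_index], q.1.2.2.1 ++ [q.2], q.1.2.2.2 + 1), q.2 + 1))
          ((st.1, st.2.1, st.2.2.1, st.2.2.2.1), (0 : Int))
        (inner.1.1, inner.1.2.1, inner.1.2.2.1, inner.1.2.2.2, un_index + 1))
      (it, ut, nu, idx, un)
    = (it ++ PySem.List.pyRange idx (idx + pvTot fl) 1,
       ut ++ pvU fl un,
       nu ++ pvN fl,
       idx + pvTot fl,
       un + fl.length) := by
  induction fl generalizing it ut nu idx un with
  | nil => simp [pvTot, pvU, pvN, PySem.List.pyRange_one_eq_nil]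
  | cons i rest ih =>
      simp only [List.foldl_cons]
      rw [innerA, ih]
      have hsplit : PySem.List.pyRange idx (idx + pvTot (i :: rest)) 1
          = PySem.List.pyRange idx (idx + i.length) 1
            ++ PySem.List.pyRange (idx + i.length) (idx + i.length + pvTot rest) 1 := by
        have : idx + pvTot (i :: rest) = idx + i.length + pvTot rest := by
          simp [pvTot]; ring
        have hnn : (0 : Int) ≤ pvTot rest := by
          simp only [pvTot]
          exact List.sum_nonneg (by intro x hx; simp at hx; obtain ⟨a, _, rfl⟩ := hx; positivity)
        rw [this]
        exact PySem.List.pyRange_one_append idx (idx + (i.length : Int)) (idx + (i.length : Int) + pvTot rest) (by omega) (by omega)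
      rw [hsplit]
      simp [pvU, pvN, pvTot, List.append_assoc]
      and_intros <;> omega

lemma altB (fl : List (List Int)) (s : Int) (ut nu : List Int) :
    (PySem.List.enumerate (fl.map (fun i => (i.length : Int))) s).foldl
      (fun (st : List Int × List Int) p =>
        (st.1 ++ PySem.List.pyRepeat [p.1] p.2, st.2 ++ PySem.List.pyRange 0 p.2 1))
      (ut, nu)
    = (ut ++ pvU fl s, nu ++ pvN fl) := by
  induction fl generalizing s ut nu with
  | nil => simp [pvU, pvN]
  | cons i rest ih =>
      simp only [List.map_cons, PySem.List.enumerate_cons, List.foldl_cons]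
      rw [ih]
      simp [pvU, pvN, PySem.List.pyRepeat_singleton, List.append_assoc]

-- ===== VERDICT (by name: the statement is the Claim_ definition above) =====
theorem index_dir_spec : Claim_equal_index_dir := by
  intro fl _
  show index_dir fl = index_dir_alt fl
  unfold index_dir index_dir_alt
  dsimp only
  rw [outerA, altB]
  simp [pvTot]
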